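-- pv_equiv track=rewrite | github.com/peter1000ys/Daily_Algorithm | 백준/Silver/1697. 숨바꼭질/숨바꼭질.py | bfs
-- ===== SOURCE A (Python) =====
-- from collections import deque
--
-- def bfs(n, k):
--     used = [0] * 200001
--     queue = deque()
--     queue.append(n)
--     used[n] = 1
--
--     while queue:
--         x = queue.popleft()
--         for a in (x+1, x-1, 2*x):
--             if 0<= a <= 200000 and used[a] == 0:
--                 queue.append(a)
--                 used[a] = used[x] + 1
--         if x == k:
--             return used[k] - 1
-- ===== SOURCE B (Python) =====
-- def bfs(n, k):
--     # level-synchronous BFS in staged passes: one comprehension generates the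
--     # in-range candidates of the whole frontier, then a commit pass keeps each
--     # first unseen occurrence -- no deque, no per-node distance array, only
--     # boolean seen flags and a level counter.
--     seen = [False] * 200001
--     seen[n] = True
--     frontier = [n]
--     d = 0
--     while frontier:
--         if k in frontier:
--             return d
--         cand = [a for x in frontier
--                   for a in (x + 1, x - 1, 2 * x)
--                   if 0 <= a <= 200000]
--         nxt = []
--         for a in cand:
--             if not seen[a]:
--                 seen[a] = True
--                 nxt.append(a)
--         frontier = nxt
--         d += 1
-- ===== Notes on version B (the rewrite author's own statement) =====
-- stated objective: alternative
-- what changed: replaces A's deque-plus-distance-array BFS that interleaves popping, marking and enqueuing per node with a staged level-synchronous BFS: one comprehension generates the in-range candidates of the whole frontier, a separate commit pass keeps each first unseen occurrence as the next frontier, and only boolean seen flags plus a level counter are kept (no deque, no per-node distance array)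
-- outside the precondition, e.g. on bfs(-1, 5): A returns 5, B returns 5; on bfs(3, 200001): A returns None, B returns None; on bfs(300000, 5): A raises IndexError, B raises IndexError
import Mathlib
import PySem

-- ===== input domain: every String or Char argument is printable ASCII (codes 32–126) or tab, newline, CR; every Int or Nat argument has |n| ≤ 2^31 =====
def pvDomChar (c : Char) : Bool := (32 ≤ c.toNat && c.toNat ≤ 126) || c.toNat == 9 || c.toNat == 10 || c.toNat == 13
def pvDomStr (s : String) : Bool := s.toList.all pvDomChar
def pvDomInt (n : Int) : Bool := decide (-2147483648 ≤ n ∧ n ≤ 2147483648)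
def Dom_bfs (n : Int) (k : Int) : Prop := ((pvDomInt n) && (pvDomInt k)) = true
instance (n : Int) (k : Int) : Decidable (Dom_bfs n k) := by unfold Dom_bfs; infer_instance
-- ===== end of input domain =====

-- B replaces A's deque-and-distance-array BFS by staged level expansion: a comprehension
-- collects the in-range candidates of the whole frontier, then a commit pass keeps each
-- first unseen occurrence as the next frontier; same cost, different structure.

-- Python negative-index wrap on the 200001-cell list (exact for -200001 ≤ i < 200001;
-- beyond that Python raises IndexError — excluded by Pre_).
def pvIdx (i : Int) : Nat := if i < 0 then (200001 + i).toNat else i.toNat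

-- ===== PORT A =====
-- the tuple (x+1, x-1, 2*x)
def pvNbrs (x : Int) : List Int := [x + 1, x - 1, 2 * x]

-- one iteration of A's inner `for a in (x+1, x-1, 2*x)` loop; the deque is kept as
-- front/back lists (append = cons on back, popleft from front, refilled by reverse)
def pvPushA (x : Int) (st : Array Nat × List Int) (a : Int) : Array Nat × List Int :=
  if 0 ≤ a ∧ a ≤ 200000 ∧ st.1[pvIdx a]! = 0 then
    (st.1.setIfInBounds (pvIdx a) (st.1[pvIdx x]! + 1), a :: st.2)
  else st

def pvStepA (st : Array Nat × List Int) (x : Int) : Array Nat × List Int :=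
  (pvNbrs x).foldl (pvPushA x) st

-- A's `while queue` loop; fuel only makes it total (1000000 exceeds the possible
-- number of iterations: ≤ 200001 enqueues plus refills); returns -1 where Python
-- falls off the loop returning None (excluded by Pre_)
def pvLoopA (k : Int) : Nat → Array Nat → List Int → List Int → Int
  | 0, _, _, _ => -1
  | fuel+1, used, front, back =>
    match front with
    | [] => if back.isEmpty then -1 else pvLoopA k fuel used back.reverse []
    | x :: f =>
      let st := pvStepA (used, back) x
      if x = k then (st.1[pvIdx k]! : Int) - 1
      else pvLoopA k fuel st.1 f st.2

def bfs (n : Int) (k : Int) : Int :=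
  pvLoopA k 1000000 ((Array.replicate 200001 0).setIfInBounds (pvIdx n) 1) [n] []

-- ===== PORT B =====
-- the comprehension [a for x in frontier for a in (x+1, x-1, 2*x) if 0 <= a <= 200000]
def pvCand (frontier : List Int) : List Int :=
  frontier.flatMap (fun x =>
    [x + 1, x - 1, 2 * x].filter (fun a => decide (0 ≤ a) && decide (a ≤ 200000)))

-- the commit pass `if not seen[a]: seen[a] = True; nxt.append(a)`
-- (nxt accumulated by cons, read back in order via reverse)
def pvTake (st : Array Bool × List Int) (a : Int) : Array Bool × List Int :=
  if st.1[pvIdx a]! then st else (st.1.setIfInBounds (pvIdx a) true, a :: st.2)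

-- B's `while frontier` loop; fuel only makes it total (200002 exceeds the possible
-- number of levels); -1 where Python returns None (excluded by Pre_)
def pvLoopB (k : Int) : Nat → Array Bool → List Int → Int → Int
  | 0, _, _, _ => -1
  | fuel+1, seen, frontier, d =>
    if frontier.isEmpty then -1
    else if frontier.contains k then d
    else
      let st := (pvCand frontier).foldl pvTake (seen, [])
      pvLoopB k fuel st.1 st.2.reverse (d + 1)

def bfs_alt (n : Int) (k : Int) : Int :=
  pvLoopB k 200002 ((Array.replicate 200001 false).setIfInBounds (pvIdx n) true) [n] 0

-- ===== PRECONDITION & SPEC =====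
-- Pre_ restricts to the puzzle's natural board 0 ≤ n, k ≤ 200000 (the range A itself
-- enforces on every move): outside it A raises IndexError (n > 200000 or n < -200001),
-- returns None instead of an int (k outside the board), or — for -200001 ≤ n < 0 —
-- returns values produced by Python's negative-index wraparound, which is no part of
-- the function's meaning.
def Pre_bfs (n : Int) (k : Int) : Prop :=
  0 ≤ n ∧ n ≤ 200000 ∧ 0 ≤ k ∧ k ≤ 200000
instance (n : Int) (k : Int) : Decidable (Pre_bfs n k) := by unfold Pre_bfs; infer_instance
def pvWitness_bfs : Int × Int := (5, 17)

def Spec_bfs (n : Int) (k : Int) (out : Int) : Prop := out = bfs_alt n k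
instance (n : Int) (k : Int) (out : Int) : Decidable (Spec_bfs n k out) := by unfold Spec_bfs; infer_instance

-- ===== CLAIM (what is proved, stated in full; the proofs are below) =====
def Claim_equal_bfs : Prop := ∀ (n : Int) (k : Int), Dom_bfs n k → Pre_bfs n k → Spec_bfs n k (bfs n k)

-- ===== LEMMAS AND PROOFS =====

-- number of still-unvisited cells of A's distance array
def pvZ (u : Array Nat) : Nat := u.toList.count 0

-- candidate step with a FIXED write value v (A's pvPushA once used[x] is known to be c)
def pvPushC (v : Nat) (st : Array Nat × List Int) (a : Int) : Array Nat × List Int :=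
  if 0 ≤ a ∧ a ≤ 200000 ∧ st.1[pvIdx a]! = 0 then
    (st.1.setIfInBounds (pvIdx a) v, a :: st.2)
  else st

theorem pvIdx_nonneg {a : Int} (h : 0 ≤ a) : pvIdx a = a.toNat := by
  unfold pvIdx; rw [if_neg (by omega)]

theorem set_get!_ne {α : Type} [Inhabited α] (u : Array α) (i j : Nat) (v : α) (h : i ≠ j) :
    (u.setIfInBounds i v)[j]! = u[j]! := by
  by_cases hj : j < u.size
  · rw [getElem!_pos _ j (by simpa [Array.size_setIfInBounds] using hj), getElem!_pos u j hj,
      Array.getElem_setIfInBounds hj, if_neg h]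
  · rw [getElem!_neg _ j (by simpa [Array.size_setIfInBounds] using hj), getElem!_neg u j hj]

theorem set_get!_self {α : Type} [Inhabited α] (u : Array α) (i : Nat) (v : α) (h : i < u.size) :
    (u.setIfInBounds i v)[i]! = v := by
  rw [getElem!_pos _ i (by simpa [Array.size_setIfInBounds] using h),
    Array.getElem_setIfInBounds h, if_pos rfl]

theorem pvZ_set (u : Array Nat) (i v : Nat) (h : i < u.size) (h0 : u[i]! = 0) (hv : v ≠ 0) :
    pvZ (u.setIfInBounds i v) + 1 = pvZ u := by
  have hl : i < u.toList.length := by simpa using h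
  have hget : u.toList[i] = 0 := by rw [getElem!_pos u i h] at h0; simpa using h0
  have hmem : (0 : Nat) ∈ u.toList := hget ▸ List.getElem_mem hl
  have hpos : 0 < u.toList.count 0 := List.count_pos_iff.mpr hmem
  unfold pvZ
  rw [Array.toList_setIfInBounds, List.count_set hl, if_pos (by simp [hget]),
    if_neg (by simp [hv])]
  omega

theorem pushC_size (v : Nat) (st : Array Nat × List Int) (a : Int) :
    (pvPushC v st a).1.size = st.1.size := by
  unfold pvPushC; split <;> simp [Array.size_setIfInBounds]

theorem pushC_preserve (v : Nat) (st : Array Nat × List Int) (a : Int) (j : Nat)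
    (h : st.1[j]! ≠ 0) : (pvPushC v st a).1[j]! = st.1[j]! := by
  unfold pvPushC
  split
  · next hc =>
    exact set_get!_ne st.1 _ j v (by intro he; rw [he] at hc; exact h hc.2.2)
  · rfl

theorem foldC_size (v : Nat) :
    ∀ (cs : List Int) (st : Array Nat × List Int),
    (cs.foldl (pvPushC v) st).1.size = st.1.size := by
  intro cs
  induction cs with
  | nil => intro st; rfl
  | cons a cs ih => intro st; rw [List.foldl_cons, ih, pushC_size]

theorem foldC_preserve (v : Nat) :
    ∀ (cs : List Int) (st : Array Nat × List Int) (j : Nat),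
    st.1[j]! ≠ 0 → (cs.foldl (pvPushC v) st).1[j]! = st.1[j]! := by
  intro cs
  induction cs with
  | nil => intro st j _; rfl
  | cons a cs ih =>
    intro st j h
    rw [List.foldl_cons, ih _ j (by rw [pushC_preserve v st a j h]; exact h),
      pushC_preserve v st a j h]

theorem pushA_eq_pushC (x a : Int) (c : Nat) (st : Array Nat × List Int)
    (hx : st.1[pvIdx x]! = c) : pvPushA x st a = pvPushC (c + 1) st a := by
  unfold pvPushA pvPushC; rw [hx]

theorem foldA_eq_foldC (x : Int) (c : Nat) (hc : c ≠ 0) :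
    ∀ (as : List Int) (st : Array Nat × List Int), st.1[pvIdx x]! = c →
    as.foldl (pvPushA x) st = as.foldl (pvPushC (c + 1)) st := by
  intro as
  induction as with
  | nil => intro st _; rfl
  | cons a as ih =>
    intro st hx
    rw [List.foldl_cons, List.foldl_cons, pushA_eq_pushC x a c st hx]
    exact ih _ (by rw [pushC_preserve (c+1) st a _ (by rw [hx]; exact hc)]; exact hx)

theorem stepA_eq_foldC (x : Int) (c : Nat) (hc : c ≠ 0) (st : Array Nat × List Int)
    (hx : st.1[pvIdx x]! = c) :
    pvStepA st x = (pvNbrs x).foldl (pvPushC (c + 1)) st :=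
  foldA_eq_foldC x c hc (pvNbrs x) st hx

-- flatten A's level fold into a single candidate fold with the fixed value c+1
theorem stepA_flat (c : Nat) (hc : c ≠ 0) :
    ∀ (fr : List Int) (st : Array Nat × List Int),
    (∀ y ∈ fr, st.1[pvIdx y]! = c) →
    fr.foldl pvStepA st = (fr.flatMap pvNbrs).foldl (pvPushC (c + 1)) st := by
  intro fr
  induction fr with
  | nil => intro st _; rfl
  | cons x f ih =>
    intro st hf
    rw [List.foldl_cons, List.flatMap_cons, List.foldl_append,
      ← stepA_eq_foldC x c hc st (hf x List.mem_cons_self)]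
    exact ih _ (fun y hy => by
      rw [show pvStepA st x = (pvNbrs x).foldl (pvPushC (c+1)) st from
        stepA_eq_foldC x c hc st (hf x List.mem_cons_self)]
      rw [foldC_preserve (c+1) (pvNbrs x) st (pvIdx y)
        (by rw [hf y (List.mem_cons_of_mem _ hy)]; exact hc)]
      exact hf y (List.mem_cons_of_mem _ hy))

-- A's level fold over all candidates vs B's commit pass over the in-range candidates
theorem foldAB (v : Nat) (hv : v ≠ 0) :
    ∀ (cs : List Int) (u : Array Nat) (seen : Array Bool) (l : List Int),
    u.size = 200001 → seen.size = 200001 →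
    (∀ j : Nat, seen[j]! = true ↔ u[j]! ≠ 0) →
    ((cs.filter (fun a => decide (0 ≤ a) && decide (a ≤ 200000))).foldl pvTake (seen, l)).2
      = (cs.foldl (pvPushC v) (u, l)).2 ∧
    ((cs.filter (fun a => decide (0 ≤ a) && decide (a ≤ 200000))).foldl pvTake (seen, l)).1.size
      = 200001 ∧
    (∀ j : Nat,
      ((cs.filter (fun a => decide (0 ≤ a) && decide (a ≤ 200000))).foldl pvTake (seen, l)).1[j]!
        = true ↔ (cs.foldl (pvPushC v) (u, l)).1[j]! ≠ 0) ∧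
    pvZ (cs.foldl (pvPushC v) (u, l)).1 + (cs.foldl (pvPushC v) (u, l)).2.length
      = pvZ u + l.length ∧
    (∀ y ∈ (cs.foldl (pvPushC v) (u, l)).2,
      y ∈ l ∨ (0 ≤ y ∧ y ≤ 200000 ∧ (cs.foldl (pvPushC v) (u, l)).1[pvIdx y]! = v)) := by
  intro cs
  induction cs with
  | nil =>
    intro u seen l hsz hszB hiff
    exact ⟨rfl, hszB, hiff, rfl, fun y hy => Or.inl hy⟩
  | cons a cs ih =>
    intro u seen l hsz hszB hiff
    by_cases hr : 0 ≤ a ∧ a ≤ 200000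
    · have hfil : (decide (0 ≤ a) && decide (a ≤ 200000)) = true := by
        simp [hr.1, hr.2]
      simp only [List.filter_cons, hfil, if_true, List.foldl_cons]
      by_cases hz : u[pvIdx a]! = 0
      · -- fresh: A writes v, B marks and keeps
        have hia : pvIdx a < u.size := by rw [pvIdx_nonneg hr.1, hsz]; omega
        have hiaB : pvIdx a < seen.size := by rw [pvIdx_nonneg hr.1, hszB]; omega
        have hsA : pvPushC v (u, l) a = (u.setIfInBounds (pvIdx a) v, a :: l) := by
          unfold pvPushC; rw [if_pos ⟨hr.1, hr.2, hz⟩]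
        have hsB : pvTake (seen, l) a
            = (seen.setIfInBounds (pvIdx a) true, a :: l) := by
          unfold pvTake
          rw [if_neg (by
            intro h
            exact (hiff (pvIdx a)).mp h hz)]
        have hiff' : ∀ j : Nat, (seen.setIfInBounds (pvIdx a) true)[j]! = true
            ↔ (u.setIfInBounds (pvIdx a) v)[j]! ≠ 0 := by
          intro j
          by_cases hj : j = pvIdx a
          · rw [hj, set_get!_self u (pvIdx a) v hia, set_get!_self seen (pvIdx a) true hiaB]
            simp [hv]
          · rw [set_get!_ne u _ j v (fun h => hj h.symm),
              set_get!_ne seen _ j true (fun h => hj h.symm)]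
            exact hiff j
        obtain ⟨q1, q2, q3, q4, q5⟩ :=
          ih (u.setIfInBounds (pvIdx a) v) (seen.setIfInBounds (pvIdx a) true) (a :: l)
            (by rw [Array.size_setIfInBounds, hsz])
            (by rw [Array.size_setIfInBounds, hszB]) hiff'
        rw [hsA, hsB]
        refine ⟨q1, q2, q3, ?_, ?_⟩
        · have := pvZ_set u (pvIdx a) v hia hz hv
          simp only [List.length_cons] at q4 ⊢
          omega
        · intro y hy
          rcases q5 y hy with h | h
          · rcases List.mem_cons.mp h with h2 | h2
            · subst h2
              refine Or.inr ⟨hr.1, hr.2, ?_⟩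
              rw [foldC_preserve v cs _ (pvIdx y)
                (by rw [set_get!_self u _ v hia]; exact hv),
                set_get!_self u _ v hia]
            · exact Or.inl h2
          · exact Or.inr h
      · -- already visited: both skip
        have hsA : pvPushC v (u, l) a = (u, l) := by
          unfold pvPushC; rw [if_neg (by intro h; exact hz h.2.2)]
        have hsB : pvTake (seen, l) a = (seen, l) := by
          unfold pvTake; rw [if_pos ((hiff (pvIdx a)).mpr hz)]
        rw [hsA, hsB]
        exact ih u seen l hsz hszB hiff
    · -- out of range: the filter drops a, A's guard skips it
      have hfil : (decide (0 ≤ a) && decide (a ≤ 200000)) = false := by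
        rcases not_and_or.mp hr with h | h <;> simp [h]
      have hsA : pvPushC v (u, l) a = (u, l) := by
        unfold pvPushC; rw [if_neg (by intro h; exact hr ⟨h.1, h.2.1⟩)]
      simp only [List.filter_cons, hfil, Bool.false_eq_true, if_false, List.foldl_cons]
      rw [hsA]
      exact ih u seen l hsz hszB hiff

-- A's deque loop, one whole level at a time (front emptied, back collects the next level)
theorem levelA (k : Int) (c : Nat) (hc : c ≠ 0) :
    ∀ (front : List Int) (fuel : Nat) (u : Array Nat) (back : List Int),
    u.size = 200001 →
    (∀ y ∈ front, 0 ≤ y ∧ y ≤ 200000 ∧ u[pvIdx y]! = c) →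
    front.length ≤ fuel →
    pvLoopA k fuel u front back =
      if front.contains k then (c : Int) - 1
      else pvLoopA k (fuel - front.length) (front.foldl pvStepA (u, back)).1 []
        (front.foldl pvStepA (u, back)).2 := by
  intro front
  induction front with
  | nil =>
    intro fuel u back hsz hf hfuel
    simp
  | cons x f ih =>
    intro fuel u back hsz hf hfuel
    obtain ⟨fl, rfl⟩ : ∃ fl, fuel = fl + 1 := by
      cases fuel with
      | zero => simp at hfuel
      | succ m => exact ⟨m, rfl⟩
    obtain ⟨hx0, hx1, hxv⟩ := hf x (List.mem_cons_self)
    have hst : pvStepA (u, back) x = (pvNbrs x).foldl (pvPushC (c + 1)) (u, back) :=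
      stepA_eq_foldC x c hc (u, back) hxv
    have hpres : ∀ j : Nat, u[j]! ≠ 0 → (pvStepA (u, back) x).1[j]! = u[j]! := by
      intro j hj
      rw [hst]
      exact foldC_preserve (c+1) (pvNbrs x) (u, back) j hj
    have hsz' : (pvStepA (u, back) x).1.size = 200001 := by
      rw [hst, foldC_size]; exact hsz
    by_cases hxk : x = k
    · have hval : (pvStepA (u, back) x).1[pvIdx k]! = c := by
        rw [← hxk, hpres (pvIdx x) (by rw [hxv]; exact hc)]
        exact hxv
      have hcont : (x :: f).contains k = true := by simp [hxk]
      rw [hcont, if_pos rfl]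
      simp only [pvLoopA, if_pos hxk, hval]
    · have hf' : ∀ y ∈ f, 0 ≤ y ∧ y ≤ 200000 ∧ (pvStepA (u, back) x).1[pvIdx y]! = c := by
        intro y hy
        obtain ⟨a1, a2, a3⟩ := hf y (List.mem_cons_of_mem _ hy)
        exact ⟨a1, a2, by rw [hpres (pvIdx y) (by rw [a3]; exact hc)]; exact a3⟩
      have hrec := ih fl (pvStepA (u, back) x).1 (pvStepA (u, back) x).2 hsz' hf'
        (by simpa using hfuel)
      simp only [Prod.mk.eta] at hrec
      have hcont : (x :: f).contains k = f.contains k := by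
        rw [List.contains_cons, beq_eq_false_iff_ne.mpr (Ne.symm hxk), Bool.false_or]
      simp only [pvLoopA, if_neg hxk]
      rw [hrec, hcont]
      simp only [List.foldl_cons, List.length_cons]
      have : fl - f.length = fl + 1 - (f.length + 1) := by omega
      rw [this]

theorem pvCand_eq (fr : List Int) :
    pvCand fr
    = (fr.flatMap pvNbrs).filter (fun a => decide (0 ≤ a) && decide (a ≤ 200000)) := by
  unfold pvCand pvNbrs
  induction fr with
  | nil => rfl
  | cons x fr ih => rw [List.flatMap_cons, List.flatMap_cons, List.filter_append, ih]

-- main loop correspondence: A's deque BFS level state vs B's staged level state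
theorem main_match (k : Int) :
    ∀ (z : Nat) (u : Array Nat) (front : List Int) (seen : Array Bool) (dN fuelA fuelB : Nat),
    pvZ u = z → u.size = 200001 → seen.size = 200001 →
    (∀ y ∈ front, 0 ≤ y ∧ y ≤ 200000 ∧ u[pvIdx y]! = dN + 1) →
    (∀ j : Nat, seen[j]! = true ↔ u[j]! ≠ 0) →
    front.length + 3 * z + 2 ≤ fuelA → z + 1 ≤ fuelB →
    pvLoopA k fuelA u front [] = pvLoopB k fuelB seen front (dN : Int) := by
  intro z
  induction z using Nat.strong_induction_on with
  | _ z ih =>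
    intro u front seen dN fuelA fuelB hz hsz hszB hf hiff hfA hfB
    obtain ⟨fb, rfl⟩ : ∃ fb, fuelB = fb + 1 := ⟨fuelB - 1, by omega⟩
    cases front with
    | nil =>
      obtain ⟨fa, rfl⟩ : ∃ fa, fuelA = fa + 1 := ⟨fuelA - 1, by omega⟩
      simp [pvLoopA, pvLoopB]
    | cons x f =>
      have hlev := levelA k (dN + 1) (Nat.succ_ne_zero _) (x :: f) fuelA u [] hsz hf
        (by simp only [List.length_cons] at hfA ⊢; omega)
      have hB : pvLoopB k (fb + 1) seen (x :: f) (dN : Int)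
          = if ((x :: f) : List Int).isEmpty then -1
            else if (x :: f).contains k then (dN : Int)
            else pvLoopB k fb ((pvCand (x :: f)).foldl pvTake (seen, [])).1
              ((pvCand (x :: f)).foldl pvTake (seen, [])).2.reverse ((dN : Int) + 1) := rfl
      by_cases hk : (x :: f).contains k = true
      · rw [hlev, if_pos hk, hB, if_neg (by simp), if_pos hk]
        push_cast
        ring
      · -- flatten A's level into a candidate fold and pair it with B's commit pass
        have hflat : (x :: f).foldl pvStepA (u, ([] : List Int))
            = ((x :: f).flatMap pvNbrs).foldl (pvPushC (dN + 1 + 1)) (u, []) :=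
          stepA_flat (dN + 1) (Nat.succ_ne_zero _) (x :: f) (u, [])
            (fun y hy => (hf y hy).2.2)
        obtain ⟨q1, q2, q3, q4, q5⟩ := foldAB (dN + 1 + 1) (Nat.succ_ne_zero _)
          ((x :: f).flatMap pvNbrs) u seen [] hsz hszB hiff
        set C := (x :: f).flatMap pvNbrs with hC
        set stA := C.foldl (pvPushC (dN + 1 + 1)) (u, ([] : List Int)) with hstA
        set stB := (C.filter (fun a => decide (0 ≤ a) && decide (a ≤ 200000))).foldl
          pvTake (seen, ([] : List Int)) with hstB
        have hcand : pvCand (x :: f)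
            = C.filter (fun a => decide (0 ≤ a) && decide (a ≤ 200000)) := pvCand_eq (x :: f)
        rw [hlev, if_neg hk, hB, if_neg (by simp), if_neg hk, hflat, hcand, ← hstB]
        have hszA : stA.1.size = 200001 := by rw [hstA, foldC_size]; exact hsz
        obtain ⟨m, hm⟩ : ∃ m, fuelA - (x :: f).length = m + 1 :=
          ⟨fuelA - (x :: f).length - 1, by simp only [List.length_cons] at hfA ⊢; omega⟩
        rw [hm]
        rcases hP : stA.2 with _ | ⟨b, bs⟩
        · -- nothing fresh: both sides run out
          rw [q1, hP]
          cases fb with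
          | zero => simp [pvLoopA, pvLoopB]
          | succ fb' => simp [pvLoopA, pvLoopB]
        · -- recurse on the next level (both continue with the same reversed list)
          have hA2 : pvLoopA k (m + 1) stA.1 [] (b :: bs)
              = pvLoopA k m stA.1 (b :: bs).reverse [] := by
            simp [pvLoopA]
          rw [hA2, q1, hP]
          have hz' : pvZ stA.1 + (bs.length + 1) = z := by
            have h := q4
            rw [hP] at h
            simp only [List.length_cons, List.length_nil] at h
            omega
          have hlt : pvZ stA.1 < z := by omega
          have hrec := ih (pvZ stA.1) hlt stA.1 (b :: bs).reverse stB.1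
            (dN + 1) m fb rfl hszA (by rw [hstB]; exact q2)
            (by
              intro y hy
              have hy2 : y ∈ stA.2 := by rw [hP]; exact List.mem_reverse.mp hy
              rcases q5 y hy2 with h | h
              · exact absurd h (List.not_mem_nil)
              · exact h)
            (fun j => q3 j)
            (by
              simp only [List.length_reverse, List.length_cons] at *
              omega)
            (by omega)
          rw [hrec]
          push_cast
          ring_nf

-- ===== VERDICT (by name: the statement is the Claim_ definition above) =====
theorem bfs_spec : Claim_equal_bfs := by
  intro n k _ hpre
  obtain ⟨h1, h2, h3, h4⟩ := hpre
  unfold Spec_bfs bfs bfs_alt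
  have hsz : ((Array.replicate 200001 0).setIfInBounds (pvIdx n) 1).size = 200001 := by
    simp [Array.size_setIfInBounds, Array.size_replicate]
  have hszB : ((Array.replicate 200001 false).setIfInBounds (pvIdx n) true).size = 200001 := by
    simp [Array.size_setIfInBounds, Array.size_replicate]
  have hin : pvIdx n < 200001 := by rw [pvIdx_nonneg h1]; omega
  have hget : ((Array.replicate 200001 0).setIfInBounds (pvIdx n) 1)[pvIdx n]! = 1 := by
    apply set_get!_self
    rw [Array.size_replicate]; exact hin
  have hcnt : pvZ ((Array.replicate 200001 0).setIfInBounds (pvIdx n) 1) ≤ 200001 := by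
    have hle := List.count_le_length (a := (0 : Nat))
      (l := ((Array.replicate 200001 (0 : Nat)).setIfInBounds (pvIdx n) 1).toList)
    have hlen : ((Array.replicate 200001 (0 : Nat)).setIfInBounds (pvIdx n) 1).toList.length
        = 200001 := by rw [Array.length_toList, hsz]
    unfold pvZ
    exact le_trans hle (le_of_eq hlen)
  have h0 : (0 : Int) = ((0 : Nat) : Int) := rfl
  rw [h0]
  apply main_match k (pvZ _) _ [n] _ 0 _ _ rfl hsz hszB ?_ ?_
    (by simp only [List.length_singleton]; omega) (by omega)
  · intro y hy
    rw [List.mem_singleton] at hy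
    subst hy
    exact ⟨h1, h2, hget⟩
  · intro j
    by_cases hj : j = pvIdx n
    · subst hj
      rw [hget, set_get!_self (Array.replicate 200001 false) _ true
        (by rw [Array.size_replicate]; exact hin)]
      simp
    · rw [set_get!_ne (Array.replicate 200001 (0 : Nat)) _ j 1 (fun h => hj h.symm),
        set_get!_ne (Array.replicate 200001 false) _ j true (fun h => hj h.symm)]
      by_cases hlt : j < 200001
      · rw [getElem!_pos _ j (by simpa using hlt), getElem!_pos _ j (by simpa using hlt)]
        simp
      · rw [getElem!_neg _ j (by simpa using hlt), getElem!_neg _ j (by simpa using hlt)]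
        simp
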